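-- pv_equiv track=rewrite | github.com/daniel-reich/ubiquitous-fiesta | ke4FSMdG2XYxbGQny_21.py | even_odd_transform
-- ===== SOURCE A (Python) =====
-- def even_odd_transform(lst, n):
--   for i in range(n):
--     x = []
--     for num in lst:
--       if num % 2 == 0:
--         x.append(num - 2)
--       else:
--         x.append(num + 2)
--     lst = x
--   return lst
-- ===== SOURCE B (Python) =====
-- def even_odd_transform(lst, n):
--   k = max(n, 0)
--   return [x - 2 * k if x % 2 == 0 else x + 2 * k for x in lst]
-- ===== Notes on version B (the rewrite author's own statement) =====
-- stated objective: faster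
-- what changed: Replaces n rebuilding passes over the list with a single pass applying the closed-form shift of +/-2n per element (parity is preserved by each step).
import Mathlib
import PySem

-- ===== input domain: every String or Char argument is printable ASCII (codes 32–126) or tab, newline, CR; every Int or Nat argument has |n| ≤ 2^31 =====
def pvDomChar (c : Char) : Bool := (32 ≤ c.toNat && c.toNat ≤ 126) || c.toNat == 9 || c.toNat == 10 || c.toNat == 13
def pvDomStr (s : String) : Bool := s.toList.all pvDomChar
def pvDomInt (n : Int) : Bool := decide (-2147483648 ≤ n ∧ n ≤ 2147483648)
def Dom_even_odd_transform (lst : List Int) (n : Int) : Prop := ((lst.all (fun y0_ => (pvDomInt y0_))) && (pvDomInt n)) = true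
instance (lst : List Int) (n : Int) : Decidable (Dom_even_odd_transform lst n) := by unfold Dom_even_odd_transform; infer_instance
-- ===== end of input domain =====

-- B replaces A's n rebuilding passes by one pass shifting each element by ±2·max(n,0) (parity is invariant); equivalence is proved on all inputs.

-- ===== PORT A =====
-- the inner 'for num in lst' pass building x by appends
def evenOddPass (lst : List Int) : List Int :=
  lst.foldl (fun x num =>
    if PySem.Int.mod num 2 == 0 then x ++ [num - 2] else x ++ [num + 2]) []

def even_odd_transform (lst : List Int) (n : Int) : List Int :=
  (PySem.List.pyRange 0 n 1).foldl (fun cur _ => evenOddPass cur) lst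

-- ===== PORT B =====
def even_odd_transform_alt (lst : List Int) (n : Int) : List Int :=
  let k := max n 0
  lst.map (fun x => if PySem.Int.mod x 2 == 0 then x - 2 * k else x + 2 * k)

-- ===== PRECONDITION & SPEC =====
def Spec_even_odd_transform (lst : List Int) (n : Int) (out : List Int) : Prop := out = even_odd_transform_alt lst n
instance (lst : List Int) (n : Int) (out : List Int) : Decidable (Spec_even_odd_transform lst n out) := by unfold Spec_even_odd_transform; infer_instance

-- ===== CLAIM (what is proved, stated in full; the proofs are below) =====
def Claim_equal_even_odd_transform : Prop := ∀ (lst : List Int) (n : Int), Dom_even_odd_transform lst n → Spec_even_odd_transform lst n (even_odd_transform lst n)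

-- ===== LEMMAS AND PROOFS =====

def shiftF (k : Int) (x : Int) : Int :=
  if x % 2 = 0 then x - 2 * k else x + 2 * k

lemma mod2_bool (x : Int) : (PySem.Int.mod x 2 == 0) = decide (x % 2 = 0) := by
  rw [PySem.Int.mod_eq_emod_of_pos (by norm_num : (0 : Int) < 2)]
  apply Bool.eq_iff_iff.mpr
  simp

lemma fun_eq (x : List Int) (num : Int) :
    (if PySem.Int.mod num 2 == 0 then x ++ [num - 2] else x ++ [num + 2])
      = x ++ [shiftF 1 num] := by
  simp only [mod2_bool, decide_eq_true_eq, shiftF]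
  split <;> norm_num

lemma pass_acc (lst acc : List Int) :
    lst.foldl (fun x num => x ++ [shiftF 1 num]) acc = acc ++ lst.map (shiftF 1) := by
  induction lst generalizing acc with
  | nil => simp
  | cons h t ih =>
    simp only [List.foldl_cons, List.map_cons]
    rw [ih]
    simp

lemma pass_eq_map (lst : List Int) : evenOddPass lst = lst.map (shiftF 1) := by
  unfold evenOddPass
  simp only [fun_eq]
  simpa using pass_acc lst []

lemma shift_step (k : Int) (x : Int) : shiftF 1 (shiftF k x) = shiftF (k + 1) x := by
  unfold shiftF
  by_cases h : x % 2 = 0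
  · rw [if_pos h, if_pos (show (x - 2 * k) % 2 = 0 by omega), if_pos h]
    ring
  · rw [if_neg h, if_neg (show ¬(x + 2 * k) % 2 = 0 by omega), if_neg h]
    ring

lemma iter_eq (m : Nat) (lst : List Int) :
    (List.range m).foldl (fun cur _ => evenOddPass cur) lst = lst.map (shiftF (m : Int)) := by
  induction m generalizing lst with
  | zero =>
    simp only [List.range_zero, List.foldl_nil, Nat.cast_zero]
    apply List.ext_getElem <;> simp [shiftF]
  | succ m ih =>
    rw [List.range_succ, List.foldl_append]
    simp only [List.foldl_cons, List.foldl_nil]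
    rw [ih, pass_eq_map, List.map_map]
    apply List.map_congr_left
    intro x _
    have := shift_step (m : Int) x
    simpa [Function.comp] using this

-- ===== VERDICT (by name: the statement is the Claim_ definition above) =====
theorem even_odd_transform_spec : Claim_equal_even_odd_transform := by
  intro lst n _
  unfold Spec_even_odd_transform even_odd_transform even_odd_transform_alt
  rw [PySem.List.pyRange_one]
  rw [List.foldl_map, iter_eq]
  have hk : ((n - 0).toNat : Int) = max n 0 := by omega
  rw [hk]
  apply List.map_congr_left
  intro x _
  simp only [mod2_bool, decide_eq_true_eq, shiftF]
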